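-- pv_equiv track=rewrite | github.com/joojaeyoon/PS | Programmers/kakao_bridge2.py | solution
-- ===== SOURCE A (Python) =====
-- def solution(stones, k):
--     answer=0
--
--     lo=0
--     hi=200000000
--
--     while lo <= hi:
--
--         mid=(lo+hi)>>1
--
--         s=list(stones)
--
--         for i in range(len(s)):
--             s[i] -= mid
--
--         seq_minus,max_minus= 0, 0
--
--         for i in range(len(s)):
--             if s[i]<0:
--                 seq_minus+=1
--                 max_minus=max(max_minus,seq_minus)
--             else:
--                 seq_minus=0
--
--         if max_minus < k:
--             if answer < mid:
--                 answer = mid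
--             lo = mid + 1
--         else:
--             hi = mid - 1
--
--     return answer
-- ===== SOURCE B (Python) =====
-- def solution(stones, k):
--     # min over all k-length windows of the window maximum, clamped to A's
--     # search range [0, 200000000]; k<=0 -> 0, k>len(stones) -> 200000000.
--     n = len(stones)
--     if k <= 0:
--         return 0
--     if k > n:
--         return 200000000
--     best = None
--     for i in range(n - k + 1):
--         m = stones[i]
--         for j in range(i + 1, i + k):
--             if m < stones[j]:
--                 m = stones[j]
--         if best is None or m < best:
--             best = m
--     if best < 0:
--         best = 0
--     if best > 200000000:
--         best = 200000000
--     return best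
-- ===== Notes on version B (the rewrite author's own statement) =====
-- stated objective: alternative
-- what changed: Replaces A's parametric binary search over the answer (each probe rescanning the array for the longest run of stones below the probe) by a direct computation of the minimum over all k-length windows of the window maximum, clamped to A's search range [0, 200000000].
import Mathlib
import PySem

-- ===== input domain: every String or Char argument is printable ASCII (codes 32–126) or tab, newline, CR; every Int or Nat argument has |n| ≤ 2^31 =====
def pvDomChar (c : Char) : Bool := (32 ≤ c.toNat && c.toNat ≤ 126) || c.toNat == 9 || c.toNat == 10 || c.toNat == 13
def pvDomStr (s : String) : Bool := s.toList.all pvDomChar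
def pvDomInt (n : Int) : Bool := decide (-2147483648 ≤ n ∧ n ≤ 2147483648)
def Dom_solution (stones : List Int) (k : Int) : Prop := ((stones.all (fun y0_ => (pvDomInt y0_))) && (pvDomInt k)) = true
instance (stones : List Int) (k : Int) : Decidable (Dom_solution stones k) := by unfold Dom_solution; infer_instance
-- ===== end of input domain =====

-- B replaces A's binary search over the answer by the direct minimum over all
-- k-windows of the window maximum (clamped to A's search range); alternative algorithm, no speed claim.


-- ===== PORT A =====
-- the inner scan of A: over s (already shifted by mid), state (seq_minus, max_minus)
def stepA (st : Int × Int) (x : Int) : Int × Int :=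
  if x < 0 then (st.1 + 1, max st.2 (st.1 + 1)) else (0, st.2)

-- the while-loop of A; '(lo+hi)>>1' is floor division by 2 (exact also on negatives)
def solLoop (stones : List Int) (k lo hi answer : Int) : Int :=
  if h : lo ≤ hi then
    let mid := PySem.Int.floordiv (lo + hi) 2
    let s := stones.map (fun v => v - mid)          -- 'for i: s[i] -= mid'
    let r := s.foldl stepA ((0 : Int), (0 : Int))   -- the seq_minus/max_minus scan
    if r.2 < k then
      solLoop stones k (mid + 1) hi (if answer < mid then mid else answer)
    else
      solLoop stones k lo (mid - 1) answer
  else answer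
termination_by (hi + 1 - lo).toNat
decreasing_by
  · have := PySem.Int.floordiv_two_mid_bounds h; omega
  · have := PySem.Int.floordiv_two_mid_bounds h; omega

def solution (stones : List Int) (k : Int) : Int :=
  solLoop stones k 0 200000000 0

-- ===== PORT B =====
-- max over stones[i:i+k] via the inner index loop of B
def winMax (stones : List Int) (i k : Int) : Int :=
  (PySem.List.pyRange (i + 1) (i + k) 1).foldl
    (fun m j => if m < PySem.List.pyGetD stones j 0 then PySem.List.pyGetD stones j 0 else m)
    (PySem.List.pyGetD stones i 0)

-- the 'best' accumulator of B (None = Python's None)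
def bestFold (stones : List Int) (k : Int) : Option Int :=
  (PySem.List.pyRange 0 ((stones.length : Int) - k + 1) 1).foldl
    (fun best i =>
      match best with
      | none => some (winMax stones i k)
      | some b => if winMax stones i k < b then some (winMax stones i k) else some b)
    none

def solution_alt (stones : List Int) (k : Int) : Int :=
  let n : Int := stones.length
  if k ≤ 0 then 0
  else if n < k then 200000000
  else
    match bestFold stones k with
    | none => 0   -- unreachable: range(n-k+1) is nonempty when 1 ≤ k ≤ n
    | some b => if b < 0 then 0 else if 200000000 < b then 200000000 else b

-- ===== PRECONDITION & SPEC =====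
def Spec_solution (stones : List Int) (k : Int) (out : Int) : Prop := out = solution_alt stones k
instance (stones : List Int) (k : Int) (out : Int) : Decidable (Spec_solution stones k out) := by unfold Spec_solution; infer_instance

-- ===== CLAIM (what is proved, stated in full; the proofs are below) =====
def Claim_equal_solution : Prop := ∀ (stones : List Int) (k : Int), Dom_solution stones k → Spec_solution stones k (solution stones k)

-- ===== LEMMAS AND PROOFS =====

-- A's scan, expressed directly over stones with threshold mid
def mstep (mid : Int) (st : Int × Int) (x : Int) : Int × Int :=
  if x < mid then (st.1 + 1, max st.2 (st.1 + 1)) else (0, st.2)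

def runF (mid : Int) (l : List Int) : Int × Int := l.foldl (mstep mid) (0, 0)

-- the last m elements / the k-window starting at index i
def lastN (m : Nat) (l : List Int) : List Int := l.drop (l.length - m)
def winL (l : List Int) (i K : Nat) : List Int := (l.drop i).take K

lemma foldA_eq_runF (mid : Int) (l : List Int) (s : Int × Int) :
    (l.map (fun v => v - mid)).foldl stepA s = l.foldl (mstep mid) s := by
  rw [List.foldl_map]
  congr 1
  funext st x
  by_cases h : x < mid
  · rw [stepA, if_pos (by omega), mstep, if_pos h]
  · rw [stepA, if_neg (by omega), mstep, if_neg h]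

lemma runF_bd (mid : Int) :
    ∀ (l : List Int) (s : Int × Int), 0 ≤ s.1 → 0 ≤ s.2 →
      0 ≤ (l.foldl (mstep mid) s).1 ∧ (l.foldl (mstep mid) s).1 ≤ s.1 + l.length ∧
      0 ≤ (l.foldl (mstep mid) s).2 ∧ (l.foldl (mstep mid) s).2 ≤ max s.2 (s.1 + l.length) := by
  intro l
  induction l with
  | nil => intro s h1 h2; simp; omega
  | cons x l ih =>
    intro s h1 h2
    simp only [List.foldl_cons, mstep]
    by_cases h : x < mid
    · rw [if_pos h]
      have := ih (s.1 + 1, max s.2 (s.1 + 1)) (by omega) (by simp; omega)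
      simp at this ⊢
      omega
    · rw [if_neg h]
      have := ih (0, s.2) (by omega) h2
      simp at this ⊢
      omega

lemma winL_append (l : List Int) (x : Int) (i K : Nat) (h : i + K ≤ l.length) :
    winL (l ++ [x]) i K = winL l i K := by
  rw [winL, winL, List.drop_append_of_le_length (by omega)]
  rw [List.take_append_of_le_length (by simp; omega)]

lemma winL_last (l : List Int) (x : Int) (K : Nat) (hK : 1 ≤ K) (h : K ≤ l.length + 1) :
    winL (l ++ [x]) (l.length + 1 - K) K = lastN (K - 1) l ++ [x] := by
  rw [winL, lastN, List.drop_append_of_le_length (by omega)]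
  have h1 : l.length + 1 - K = l.length - (K - 1) := by omega
  rw [h1]
  apply List.take_of_length_le
  simp only [List.length_append, List.length_drop, List.length_singleton]
  omega

lemma lastN_append (l : List Int) (x : Int) (m : Nat) (h : m ≤ l.length) :
    lastN (m + 1) (l ++ [x]) = lastN m l ++ [x] := by
  rw [lastN, lastN]
  have h1 : (l ++ [x]).length - (m + 1) = l.length - m := by simp
  rw [h1, List.drop_append_of_le_length (by omega)]

lemma runF_inv (mid : Int) (K : Nat) (hK : 1 ≤ K) (l : List Int) :
    (∀ m : Nat, m ≤ l.length → (((m : Int) ≤ (runF mid l).1) ↔ ∀ x ∈ lastN m l, x < mid)) ∧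
    (((runF mid l).2 < (K : Int)) ↔ ∀ i : Nat, i + K ≤ l.length → ∃ x ∈ winL l i K, mid ≤ x) := by
  induction l using List.reverseRecOn with
  | nil =>
    constructor
    · intro m hm
      have hm0 : m = 0 := by simpa using hm
      subst hm0
      simp [runF, lastN]
    · simp only [runF, List.foldl_nil, List.length_nil]
      constructor
      · intro _ i hi; omega
      · intro _; exact_mod_cast by omega
  | append_singleton l x ih =>
    obtain ⟨ihseq, ihmax⟩ := ih
    have hbd := runF_bd mid l (0, 0) (by simp) (by simp)
    have ha0 : 0 ≤ (runF mid l).1 := hbd.1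
    have ha1 : (runF mid l).1 ≤ l.length := by have := hbd.2.1; simpa using this
    have hb0 : 0 ≤ (runF mid l).2 := hbd.2.2.1
    have hb1 : (runF mid l).2 ≤ l.length := by
      have h := hbd.2.2.2
      have hmax : max ((0,0).2 : Int) (((0,0).1 : Int) + (l.length : Int)) = l.length := by
        simp
      rw [hmax] at h
      exact h
    have hstep : runF mid (l ++ [x]) = mstep mid (runF mid l) x := by
      rw [runF, List.foldl_append, List.foldl_cons, List.foldl_nil]; rfl
    have hsplit : (∀ i : Nat, i + K ≤ (l ++ [x]).length → ∃ y ∈ winL (l ++ [x]) i K, mid ≤ y) ↔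
        ((∀ i : Nat, i + K ≤ l.length → ∃ y ∈ winL l i K, mid ≤ y) ∧
         (K ≤ l.length + 1 → ∃ y ∈ lastN (K - 1) l ++ [x], mid ≤ y)) := by
      simp only [List.length_append, List.length_singleton]
      constructor
      · intro h
        refine ⟨fun i hi => ?_, fun hKl => ?_⟩
        · obtain ⟨y, hy, hy2⟩ := h i (by omega)
          rw [winL_append l x i K hi] at hy
          exact ⟨y, hy, hy2⟩
        · obtain ⟨y, hy, hy2⟩ := h (l.length + 1 - K) (by omega)
          rw [winL_last l x K hK hKl] at hy
          exact ⟨y, hy, hy2⟩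
      · rintro ⟨h1, h2⟩ i hi
        by_cases hle : i + K ≤ l.length
        · obtain ⟨y, hy, hy2⟩ := h1 i hle
          rw [winL_append l x i K hle]
          exact ⟨y, hy, hy2⟩
        · have : i = l.length + 1 - K := by omega
          subst this
          rw [winL_last l x K hK (by omega)]
          exact h2 (by omega)
    by_cases hx : x < mid
    · have hstep' : runF mid (l ++ [x]) = ((runF mid l).1 + 1, max (runF mid l).2 ((runF mid l).1 + 1)) := by
        rw [hstep, mstep, if_pos hx]
      have h1' : (runF mid (l ++ [x])).1 = (runF mid l).1 + 1 := by rw [hstep']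
      have h2' : (runF mid (l ++ [x])).2 = max (runF mid l).2 ((runF mid l).1 + 1) := by rw [hstep']
      constructor
      · intro m hm
        rw [h1']
        simp only [List.length_append, List.length_singleton] at hm
        match m with
        | 0 =>
          simp [lastN]
          omega
        | m + 1 =>
          rw [lastN_append l x m (by omega)]
          simp only [List.mem_append, List.mem_singleton]
          have hc := ihseq m (by omega)
          push_cast
          constructor
          · intro h y hy
            rcases hy with hy | rfl
            · exact (hc.1 (by omega)) y hy
            · exact hx
          · intro h
            have : (m : Int) ≤ (runF mid l).1 := hc.2 (fun y hy => h y (Or.inl hy))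
            omega
      · rw [h2', hsplit, max_lt_iff]
        have hlast : ∀ (_ : K ≤ l.length + 1),
            ((∃ y ∈ lastN (K - 1) l ++ [x], mid ≤ y) ↔ ¬ ((K : Int) - 1 ≤ (runF mid l).1)) := by
          intro hKl
          have hch := ihseq (K - 1) (by omega)
          have hcast : (((K - 1 : Nat) : Int)) = (K : Int) - 1 := by omega
          rw [hcast] at hch
          constructor
          · rintro ⟨y, hy, hy2⟩ hle
            rcases List.mem_append.1 hy with hy | hy
            · exact absurd (hch.1 hle y hy) (by omega)
            · simp at hy; subst hy; omega
          · intro hne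
            have hnall : ¬ ∀ y ∈ lastN (K - 1) l, y < mid := fun hall => hne (hch.2 hall)
            simp only [not_forall, not_lt, exists_prop] at hnall
            obtain ⟨y, hy, hy2⟩ := hnall
            exact ⟨y, List.mem_append_left _ hy, hy2⟩
        constructor
        · rintro ⟨hbK, haK⟩
          exact ⟨ihmax.1 hbK, fun hKl => (hlast hKl).2 (by omega)⟩
        · rintro ⟨hold, hlastc⟩
          refine ⟨ihmax.2 hold, ?_⟩
          by_cases hKl : K ≤ l.length + 1
          · have := (hlast hKl).1 (hlastc hKl)
            omega
          · omega
    · have hstep' : runF mid (l ++ [x]) = (0, (runF mid l).2) := by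
        rw [hstep, mstep, if_neg hx]
      have h1' : (runF mid (l ++ [x])).1 = 0 := by rw [hstep']
      have h2' : (runF mid (l ++ [x])).2 = (runF mid l).2 := by rw [hstep']
      constructor
      · intro m hm
        rw [h1']
        simp only [List.length_append, List.length_singleton] at hm
        match m with
        | 0 =>
          simp [lastN]
        | m + 1 =>
          rw [lastN_append l x m (by omega)]
          constructor
          · intro h
            exact absurd h (by push_cast; omega)
          · intro h
            exact absurd (h x (List.mem_append_right _ (by simp))) hx
      · rw [h2', hsplit, ihmax]
        constructor
        · intro h
          exact ⟨h, fun _ => ⟨x, List.mem_append_right _ (by simp), not_lt.1 hx⟩⟩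
        · exact fun h => h.1

lemma maxFold_le_iff (mid : Int) :
    ∀ (ws : List Int) (m0 : Int),
      (mid ≤ ws.foldl (fun m x => if m < x then x else m) m0) ↔ (mid ≤ m0 ∨ ∃ x ∈ ws, mid ≤ x) := by
  intro ws
  induction ws with
  | nil => simp
  | cons w ws ih =>
    intro m0
    simp only [List.foldl_cons, ih, List.mem_cons]
    constructor
    · rintro (h | h)
      · split_ifs at h with hw
        · exact Or.inr ⟨w, Or.inl rfl, h⟩
        · exact Or.inl h
      · obtain ⟨x, hx, hx2⟩ := h; exact Or.inr ⟨x, Or.inr hx, hx2⟩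
    · rintro (h | ⟨x, (rfl | hx), hx2⟩)
      · left; split_ifs with hw <;> omega
      · left; split_ifs with hw <;> omega
      · exact Or.inr ⟨x, hx, hx2⟩

lemma fold_idx (l : List Int) :
    ∀ (cnt : Nat) (a m0 : Int), 0 ≤ a → a.toNat + cnt ≤ l.length →
      (PySem.List.pyRange a (a + cnt) 1).foldl
          (fun m j => if m < PySem.List.pyGetD l j 0 then PySem.List.pyGetD l j 0 else m) m0
        = ((l.drop a.toNat).take cnt).foldl (fun m x => if m < x then x else m) m0 := by
  intro cnt
  induction cnt with
  | zero => intro a m0 ha _; rw [PySem.List.pyRange_one_eq_nil (by omega)]; simp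
  | succ cnt ih =>
    intro a m0 ha hlen
    rw [PySem.List.pyRange_one_cons (by omega)]
    have hlt : a.toNat < l.length := by omega
    have hget : PySem.List.pyGetD l a 0 = l[a.toNat] := PySem.List.pyGetD_eq_getElem l 0 ha (by omega)
    have hdrop : l.drop a.toNat = l[a.toNat] :: l.drop (a.toNat + 1) :=
      List.drop_eq_getElem_cons hlt
    rw [hdrop]
    simp only [List.foldl_cons, List.take_succ_cons, hget]
    have : a + (cnt + 1 : Nat) = (a + 1) + (cnt : Nat) := by push_cast; ring
    rw [this, ih (a + 1) _ (by omega) (by omega)]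
    have : (a + 1).toNat = a.toNat + 1 := by omega
    rw [this]

lemma winMax_le_iff (l : List Int) (i K : Nat) (hK : 1 ≤ K) (hiK : i + K ≤ l.length) (mid : Int) :
    (mid ≤ winMax l (i : Int) (K : Int)) ↔ ∃ x ∈ winL l i K, mid ≤ x := by
  have hi : i < l.length := by omega
  have hget : PySem.List.pyGetD l (i : Int) 0 = l[i] := by
    have := PySem.List.pyGetD_eq_getElem l 0 (by omega : (0:Int) ≤ (i:Int)) (by simp; omega)
    simpa using this
  have hrange : (i : Int) + (K : Int) = ((i : Int) + 1) + ((K - 1 : Nat) : Int) := by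
    push_cast [hK]; omega
  rw [winMax, hrange, fold_idx l (K-1) ((i:Int)+1) _ (by omega) (by omega), hget]
  have htn : ((i:Int)+1).toNat = i + 1 := by omega
  rw [htn, maxFold_le_iff]
  have hwin : winL l i K = l[i] :: (l.drop (i+1)).take (K-1) := by
    rw [winL, List.drop_eq_getElem_cons hi]
    have : K = (K - 1) + 1 := by omega
    rw [this, List.take_succ_cons]; simp
  rw [hwin]
  simp only [List.mem_cons]
  constructor
  · rintro (h | ⟨x, hx, h⟩)
    · exact ⟨l[i], Or.inl rfl, h⟩
    · exact ⟨x, Or.inr hx, h⟩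
  · rintro ⟨x, (rfl | hx), h⟩
    · exact Or.inl h
    · exact Or.inr ⟨x, hx, h⟩

lemma ominFold (stones : List Int) (k : Int) :
    ∀ (is : List Int) (b0 : Int), ∃ b,
      is.foldl (fun best i =>
        match best with
        | none => some (winMax stones i k)
        | some b => if winMax stones i k < b then some (winMax stones i k) else some b) (some b0) = some b ∧
      ∀ mid : Int, (mid ≤ b ↔ mid ≤ b0 ∧ ∀ i ∈ is, mid ≤ winMax stones i k) := by
  intro is
  induction is with
  | nil => intro b0; exact ⟨b0, rfl, by simp⟩
  | cons i is ih =>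
    intro b0
    simp only [List.foldl_cons]
    by_cases h : winMax stones i k < b0
    · rw [if_pos h]
      obtain ⟨b, hb, hch⟩ := ih (winMax stones i k)
      refine ⟨b, hb, fun mid => ?_⟩
      rw [hch]
      simp only [List.mem_cons]
      constructor
      · rintro ⟨h1, h2⟩
        exact ⟨by omega, fun j hj => hj.elim (fun e => e ▸ h1) (h2 j)⟩
      · rintro ⟨h1, h2⟩
        exact ⟨h2 i (Or.inl rfl), fun j hj => h2 j (Or.inr hj)⟩
    · rw [if_neg h]
      obtain ⟨b, hb, hch⟩ := ih b0
      refine ⟨b, hb, fun mid => ?_⟩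
      rw [hch]
      simp only [List.mem_cons]
      constructor
      · rintro ⟨h1, h2⟩
        exact ⟨h1, fun j hj => hj.elim (fun e => e ▸ (by omega)) (h2 j)⟩
      · rintro ⟨h1, h2⟩
        exact ⟨h1, fun j hj => h2 j (Or.inr hj)⟩

lemma bestFold_char (stones : List Int) (k : Int) (h1 : 1 ≤ k) (h2 : k ≤ (stones.length : Int)) :
    ∃ b, bestFold stones k = some b ∧
      ∀ mid : Int, (mid ≤ b ↔ ∀ i : Nat, i + k.toNat ≤ stones.length → ∃ x ∈ winL stones i k.toNat, mid ≤ x) := by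
  rw [bestFold, PySem.List.pyRange_one_cons (by omega), List.foldl_cons]
  obtain ⟨b, hb, hch⟩ := ominFold stones k (PySem.List.pyRange 1 ((stones.length : Int) - k + 1) 1) (winMax stones 0 k)
  refine ⟨b, hb, fun mid => ?_⟩
  rw [hch]
  have hwm : ∀ i : Int, 0 ≤ i → i ≤ (stones.length : Int) - k →
      ((mid ≤ winMax stones i k) ↔ ∃ x ∈ winL stones i.toNat k.toNat, mid ≤ x) := by
    intro i hi0 hile
    have hcast : winMax stones i k = winMax stones ((i.toNat : Nat) : Int) ((k.toNat : Nat) : Int) := by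
      congr 1 <;> omega
    rw [hcast]
    exact winMax_le_iff stones i.toNat k.toNat (by omega) (by omega) mid
  constructor
  · rintro ⟨hz, hr⟩ i hik
    by_cases hi0 : i = 0
    · subst hi0
      have := (hwm 0 (by omega) (by omega)).1 hz
      simpa using this
    · have hmem : (i : Int) ∈ PySem.List.pyRange 1 ((stones.length : Int) - k + 1) 1 := by
        rw [PySem.List.mem_pyRange_one]; omega
      have := (hwm i (by omega) (by omega)).1 (hr _ hmem)
      simpa using this
  · intro hall
    constructor
    · apply (hwm 0 (by omega) (by omega)).2
      simpa using hall 0 (by omega)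
    · intro j hj
      rw [PySem.List.mem_pyRange_one] at hj
      apply (hwm j (by omega) (by omega)).2
      exact hall j.toNat (by omega)

lemma solLoop_char (stones : List Int) (k t : Int) :
    ∀ (N : Nat) (lo hi ans : Int), (hi + 1 - lo).toNat ≤ N → lo - 1 ≤ ans →
      (∀ mid, lo ≤ mid → mid ≤ hi → (((runF mid stones).2 < k) ↔ mid ≤ t)) →
      solLoop stones k lo hi ans = if t < lo then ans else max ans (min hi t) := by
  intro N
  induction N with
  | zero =>
    intro lo hi ans hN hans H
    have hlh : ¬ lo ≤ hi := by omega
    rw [solLoop, dif_neg hlh]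
    split_ifs with h
    · rfl
    · omega
  | succ N ih =>
    intro lo hi ans hN hans H
    by_cases hlh : lo ≤ hi
    · rw [solLoop, dif_pos hlh]
      simp only []
      set mid := PySem.Int.floordiv (lo + hi) 2 with hmid
      have hmb := PySem.Int.floordiv_two_mid_bounds hlh
      rw [← hmid] at hmb
      rw [foldA_eq_runF]
      rw [show stones.foldl (mstep mid) ((0:Int), (0:Int)) = runF mid stones from rfl]
      by_cases hfeas : (runF mid stones).2 < k
      · rw [if_pos hfeas]
        have hmt : mid ≤ t := (H mid (by omega) (by omega)).1 hfeas
        have hrec := ih (mid + 1) hi (if ans < mid then mid else ans)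
          (by omega) (by split_ifs <;> omega)
          (fun m hm1 hm2 => H m (by omega) hm2)
        rw [hrec]
        split_ifs <;> omega
      · rw [if_neg hfeas]
        have hmt : t < mid := by
          by_contra hc
          exact hfeas ((H mid (by omega) (by omega)).2 (by omega))
        have hrec := ih lo (mid - 1) ans (by omega) hans
          (fun m hm1 hm2 => H m hm1 (by omega))
        rw [hrec]
        split_ifs <;> omega
    · rw [solLoop, dif_neg hlh]
      split_ifs with h
      · rfl
      · omega

-- ===== VERDICT (by name: the statement is the Claim_ definition above) =====
theorem solution_spec : Claim_equal_solution := by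
  unfold Claim_equal_solution
  intro stones k _
  unfold Spec_solution
  show solution stones k = solution_alt stones k
  have hbd0 : ∀ mid : Int, 0 ≤ (runF mid stones).2 ∧ (runF mid stones).2 ≤ stones.length := by
    intro mid
    have h := runF_bd mid stones (0, 0) (by simp) (by simp)
    refine ⟨h.2.2.1, ?_⟩
    have h2 := h.2.2.2
    have hmax : max (((0 : Int), (0 : Int)).2) ((((0 : Int), (0 : Int)).1) + (stones.length : Int)) = stones.length := by
      simp
    rw [hmax] at h2
    exact h2
  by_cases hk0 : k ≤ 0
  · have hH : ∀ mid : Int, 0 ≤ mid → mid ≤ 200000000 → (((runF mid stones).2 < k) ↔ mid ≤ -1) := by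
      intro mid h1 h2
      have := hbd0 mid
      constructor
      · intro h; omega
      · intro h; omega
    have hA : solution stones k = 0 := by
      rw [solution, solLoop_char stones k (-1) 200000001 0 200000000 0 (by norm_num) (by norm_num) hH]
      norm_num
    rw [hA]
    simp [solution_alt, hk0]
  · by_cases hkn : (stones.length : Int) < k
    · have hH : ∀ mid : Int, 0 ≤ mid → mid ≤ 200000000 → (((runF mid stones).2 < k) ↔ mid ≤ 200000000) := by
        intro mid h1 h2
        have := hbd0 mid
        constructor
        · intro _; omega
        · intro _; omega
      have hA : solution stones k = 200000000 := by
        rw [solution, solLoop_char stones k 200000000 200000001 0 200000000 0 (by norm_num) (by norm_num) hH]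
        norm_num
      rw [hA]
      simp only [solution_alt]
      rw [if_neg hk0, if_pos hkn]
    · have hk1 : (1 : Int) ≤ k := by omega
      have hkn' : k ≤ (stones.length : Int) := by omega
      obtain ⟨b, hb, hch⟩ := bestFold_char stones k hk1 hkn'
      have hK1 : 1 ≤ k.toNat := by omega
      have hfeas : ∀ mid : Int, ((runF mid stones).2 < k) ↔ mid ≤ b := by
        intro mid
        have hinv := (runF_inv mid k.toNat hK1 stones).2
        have hkc : ((k.toNat : Nat) : Int) = k := by omega
        rw [hkc] at hinv
        rw [hinv, hch mid]
      have hH : ∀ mid : Int, 0 ≤ mid → mid ≤ 200000000 → (((runF mid stones).2 < k) ↔ mid ≤ b) :=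
        fun mid _ _ => hfeas mid
      rw [solution, solLoop_char stones k b 200000001 0 200000000 0 (by norm_num) (by norm_num) hH]
      simp only [solution_alt]
      rw [if_neg hk0, if_neg hkn, hb]
      have hred : (match some b with
          | none => (0 : Int)
          | some b => if b < 0 then 0 else if 200000000 < b then 200000000 else b)
            = if b < 0 then (0 : Int) else if 200000000 < b then 200000000 else b := rfl
      rw [hred]
      split_ifs <;> omega
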